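-- pv_equiv track=rewrite | github.com/Khofi-Adjei007/Octos | services/services.py | _increment_alphanumeric
-- ===== SOURCE A (Python) =====
-- def _increment_alphanumeric(current):
--     """Increment an alphanumeric sequence (e.g., A1A -> A1B)."""
--     chars = list(current)
--     carry = True
--     for i in range(len(chars) - 1, -1, -1):
--         if not carry:
--             break
--         if chars[i] == 'Z':
--             chars[i] = 'A'
--         elif chars[i] == '9':
--             chars[i] = '0'
--         else:
--             chars[i] = chr(ord(chars[i]) + 1)
--             carry = False
--         if i == 0 and carry:
--             chars.insert(0, 'A')
--     return ''.join(chars)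
-- ===== SOURCE B (Python) =====
-- def _increment_alphanumeric(current):
--     """Increment an alphanumeric sequence (e.g., A1A -> A1B)."""
--     i = len(current) - 1
--     while i >= 0 and (current[i] == 'Z' or current[i] == '9'):
--         i -= 1
--     tail = ''.join('A' if c == 'Z' else '0' for c in current[i + 1:])
--     if i >= 0:
--         return current[:i] + chr(ord(current[i]) + 1) + tail
--     if current:
--         return 'A' + tail
--     return ''
-- ===== Notes on version B (the rewrite author's own statement) =====
-- stated objective: faster
-- what changed: Replaces A's stateful carry-flag scan that mutates a char list index by index with a pivot search (rightmost char not in 'Z9') followed by a segment rebuild: prefix + incremented pivot + mapped suffix.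
import Mathlib
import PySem

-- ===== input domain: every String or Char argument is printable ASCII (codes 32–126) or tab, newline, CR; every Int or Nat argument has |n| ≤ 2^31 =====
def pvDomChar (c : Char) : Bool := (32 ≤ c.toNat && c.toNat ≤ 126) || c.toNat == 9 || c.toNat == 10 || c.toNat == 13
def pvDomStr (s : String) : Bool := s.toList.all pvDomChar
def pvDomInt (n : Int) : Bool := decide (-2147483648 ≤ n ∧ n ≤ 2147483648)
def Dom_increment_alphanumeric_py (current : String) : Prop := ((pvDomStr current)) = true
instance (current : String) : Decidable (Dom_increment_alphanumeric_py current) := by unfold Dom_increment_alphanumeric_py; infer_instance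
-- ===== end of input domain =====

-- B replaces A's per-index carry-flag mutation scan by a pivot search plus slice-based rebuild (same O(n), measured constant-factor faster; return value only).



-- ===== PORT A =====
-- one loop iteration's update of chars[i] and carry, exactly A's three branches
def pvAStep (c : Char) : Char × Bool :=
  if c = 'Z' then ('A', true)
  else if c = '9' then ('0', true)
  else (Char.ofNat (c.toNat + 1), false)

-- A's loop: i runs from len-1 down to 0; 'if not carry: break' is the first test;
-- 'if i == 0 and carry: chars.insert(0, 'A')' is the last.
def pvALoop (chars : List Char) (i : Nat) (carry : Bool) : List Char :=
  if carry = false then chars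
  else
    let p := pvAStep (chars.getD i ' ')
    let chars' := chars.set i p.1
    if i = 0 then (if p.2 then 'A' :: chars' else chars')
    else pvALoop chars' (i - 1) p.2
  termination_by i
  decreasing_by omega

def increment_alphanumeric_py (current : String) : String :=
  let chars := current.toList
  match chars.length with
  | 0 => String.ofList chars          -- range(len-1, -1, -1) is empty: loop body never runs
  | Nat.succ n => String.ofList (pvALoop chars n true)

-- ===== PORT B =====
-- Source B's while loop: scan down from the end while the char is 'Z' or '9';
-- the Nat argument is (Python i) + 1, so 0 encodes Python's i = -1.
def pvBFind (chars : List Char) : Nat → Option Nat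
  | 0 => none
  | Nat.succ i =>
      if chars.getD i ' ' = 'Z' ∨ chars.getD i ' ' = '9' then pvBFind chars i
      else some i

-- Source B's tail comprehension: 'A' if c == 'Z' else '0'
def pvBMapTail (l : List Char) : List Char :=
  l.map (fun c => if c = 'Z' then 'A' else '0')

def increment_alphanumeric_py_alt (current : String) : String :=
  let chars := current.toList
  match pvBFind chars chars.length with
  | some i =>
      String.ofList (chars.take i ++ [Char.ofNat ((chars.getD i ' ').toNat + 1)]
                       ++ pvBMapTail (chars.drop (i + 1)))
  | none =>
      if chars.isEmpty then ""
      else String.ofList ('A' :: pvBMapTail chars)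

-- ===== PRECONDITION & SPEC =====
def Spec_increment_alphanumeric_py (current : String) (out : String) : Prop := out = increment_alphanumeric_py_alt current
instance (current : String) (out : String) : Decidable (Spec_increment_alphanumeric_py current out) := by unfold Spec_increment_alphanumeric_py; infer_instance

-- ===== CLAIM (what is proved, stated in full; the proofs are below) =====
def Claim_equal_increment_alphanumeric_py : Prop := ∀ (current : String), Dom_increment_alphanumeric_py current → Spec_increment_alphanumeric_py current (increment_alphanumeric_py current)

-- ===== LEMMAS AND PROOFS =====

-- common reference: increment of a REVERSED char list
def pvIncRev : List Char → List Char
  | [] => ['A']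
  | c :: rest =>
      if c = 'Z' then 'A' :: pvIncRev rest
      else if c = '9' then '0' :: pvIncRev rest
      else Char.ofNat (c.toNat + 1) :: rest

theorem pvMid_getD (f : List Char) (c : Char) (t : List Char) :
    (f ++ c :: t).getD f.length ' ' = c := by
  induction f with
  | nil => rfl
  | cons a f ih => simpa using ih

theorem pvMid_set (f : List Char) (c : Char) (t : List Char) (x : Char) :
    (f ++ c :: t).set f.length x = f ++ x :: t := by
  induction f with
  | nil => rfl
  | cons a f ih => simp [List.set, ih]

theorem pvALoop_eq (f : List Char) : ∀ (c : Char) (tail : List Char),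
    pvALoop (f ++ c :: tail) f.length true = (pvIncRev (c :: f.reverse)).reverse ++ tail := by
  induction f using List.reverseRecOn with
  | nil =>
    intro c tail
    rw [pvALoop]
    by_cases hZ : c = 'Z' <;> by_cases h9 : c = '9' <;>
      simp [pvAStep, pvIncRev, hZ, h9]
  | append_singleton g b ih =>
    intro c tail
    rw [pvALoop]
    rw [if_neg (by simp : ¬(true = false))]
    simp only [pvMid_getD, pvMid_set]
    rw [if_neg (by simp : ¬((g ++ [b]).length = 0))]
    by_cases hZ : c = 'Z'
    · subst hZ
      rw [show pvAStep 'Z' = ('A', true) from rfl]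
      simp only [List.length_append, List.length_cons, List.length_nil, Nat.add_sub_cancel]
      rw [show g ++ [b] ++ (('A', true) : Char × Bool).1 :: tail = g ++ b :: ('A' :: tail) by simp, ih b ('A' :: tail)]
      simp [pvIncRev]
    · by_cases h9 : c = '9'
      · subst h9
        rw [show pvAStep '9' = ('0', true) from rfl]
        simp only [List.length_append, List.length_cons, List.length_nil, Nat.add_sub_cancel]
        rw [show g ++ [b] ++ (('0', true) : Char × Bool).1 :: tail = g ++ b :: ('0' :: tail) by simp, ih b ('0' :: tail)]
        simp [pvIncRev]
      · rw [show pvAStep c = (Char.ofNat (c.toNat + 1), false) from by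
          simp [pvAStep, hZ, h9]]
        rw [pvALoop]
        simp [pvIncRev, hZ, h9]

theorem pvA_eq (l : List Char) (n : Nat) (h : l.length = n + 1) :
    pvALoop l n true = (pvIncRev l.reverse).reverse := by
  induction l using List.reverseRecOn with
  | nil => simp at h
  | append_singleton f c _ =>
    have hn : n = f.length := by simpa using h.symm
    have := pvALoop_eq f c []
    simpa [hn] using this

theorem pvBFind_append (f t : List Char) : ∀ n, n ≤ f.length → pvBFind (f ++ t) n = pvBFind f n := by
  intro n
  induction n with
  | zero => intro _; rfl
  | succ n ih =>
    intro h
    have hlt : n < f.length := by omega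
    rw [pvBFind, pvBFind]
    rw [show (f ++ t).getD n ' ' = f.getD n ' ' from by
      simp [List.getD, List.getElem?_append_left hlt]]
    split
    · exact ih (by omega)
    · rfl

theorem pvBFind_lt (l : List Char) : ∀ n i, pvBFind l n = some i → i < n := by
  intro n
  induction n with
  | zero => intro i h; simp [pvBFind] at h
  | succ n ih =>
    intro i h
    rw [pvBFind] at h
    split at h
    · exact Nat.lt_succ_of_lt (ih i h)
    · cases h; omega

-- B's list-level computation (used only in the proofs below)
def pvAltGo (l : List Char) : List Char :=
  match pvBFind l l.length with
  | some i => l.take i ++ [Char.ofNat ((l.getD i ' ').toNat + 1)] ++ pvBMapTail (l.drop (i + 1))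
  | none => 'A' :: pvBMapTail l

theorem pvB_eq (l : List Char) : l ≠ [] → pvAltGo l = (pvIncRev l.reverse).reverse := by
  induction l using List.reverseRecOn with
  | nil => intro h; exact absurd rfl h
  | append_singleton f c ih =>
    intro _
    have hlen : (f ++ [c]).length = f.length + 1 := by simp
    have hg : (f ++ [c]).getD f.length ' ' = c := pvMid_getD f c []
    by_cases hc : c = 'Z' ∨ c = '9'
    · by_cases hfe : f = []
      · subst hfe
        rcases hc with rfl | rfl <;> simp [pvAltGo, pvBFind, pvBMapTail, pvIncRev]
      · have ihf := ih hfe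
        have hfa : pvBFind (f ++ [c]) f.length = pvBFind f f.length :=
          pvBFind_append f [c] f.length (le_refl _)
        cases hfind : pvBFind f f.length with
        | none =>
          simp only [pvAltGo, hlen, pvBFind, hg, if_pos hc, hfa, hfind] at ihf ⊢
          rcases hc with rfl | rfl <;> simp [pvBMapTail, pvIncRev, ← ihf]
        | some i =>
          have hi : i < f.length := pvBFind_lt f f.length i hfind
          have ht : (f ++ [c]).take i = f.take i := List.take_append_of_le_length (by omega)
          have hgd : (f ++ [c]).getD i ' ' = f.getD i ' ' := by
            simp [List.getD, List.getElem?_append_left hi]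
          have hd : (f ++ [c]).drop (i + 1) = f.drop (i + 1) ++ [c] :=
            List.drop_append_of_le_length (by omega)
          simp only [pvAltGo, hlen, pvBFind, hg, if_pos hc, hfa, hfind, ht, hgd, hd] at ihf ⊢
          rcases hc with rfl | rfl <;>
            simp [pvBMapTail, pvIncRev, ← ihf]
    · rw [not_or] at hc
      simp only [pvAltGo, hlen, pvBFind, hg, if_neg (by tauto : ¬(c = 'Z' ∨ c = '9'))]
      have ht : (f ++ [c]).take f.length = f := by
        simpa using List.take_append_of_le_length (l₂ := [c]) (le_refl f.length)
      have hd : (f ++ [c]).drop (f.length + 1) = [] := by simp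
      rw [ht, hd]
      simp [pvBMapTail, pvIncRev, hc.1, hc.2]

-- ===== VERDICT (by name: the statement is the Claim_ definition above) =====
theorem increment_alphanumeric_py_spec : Claim_equal_increment_alphanumeric_py := by
  intro current _
  unfold Spec_increment_alphanumeric_py increment_alphanumeric_py increment_alphanumeric_py_alt
  cases hl : current.toList with
  | nil => simp [hl, pvBFind]
  | cons a rest =>
    have hne : current.toList ≠ [] := by rw [hl]; simp
    have hlen : current.toList.length = rest.length + 1 := by rw [hl]; simp
    have hA := pvA_eq current.toList rest.length hlen
    have hB := pvB_eq current.toList hne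
    simp only [hl] at hA hB ⊢
    simp only [List.length_cons]
    rw [hA, ← hB]
    unfold pvAltGo
    simp only [List.length_cons]
    cases hf : pvBFind (a :: rest) (rest.length + 1) <;> simp [hf]
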